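-- pv_equiv track=rewrite | github.com/krf1786/sysdash | server.py | _launcher_command_allowed
-- ===== SOURCE A (Python) =====
-- def _launcher_command_allowed(cmd: str) -> tuple[bool, str]:
--     lowered = cmd.strip().lower()
--     blocked = [
--         "rm ",
--         "sudo ",
--         "shutdown",
--         "reboot",
--         "halt",
--         "diskutil erase",
--         "diskutil partition",
--         "mkfs",
--         "dd ",
--         "launchctl bootout",
--         ":(){",
--     ]
--     for token in blocked:
--         if lowered.startswith(token) or f"; {token}" in lowered or f"&& {token}" in lowered or f"| {token}" in lowered:
--             return False, f"Blocked command pattern: {token.strip()}"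
--     return True, ""
-- ===== SOURCE B (Python) =====
-- def _launcher_command_allowed(cmd: str) -> tuple[bool, str]:
--     lowered = cmd.strip().lower()
--     # candidate command-start positions: position 0, plus the position right
--     # after every occurrence of each chaining separator
--     starts = [0] + [
--         j + len(sep)
--         for sep in ["; ", "&& ", "| "]
--         for j in range(len(lowered))
--         if lowered.startswith(sep, j)
--     ]
--     blocked = [
--         "rm ",
--         "sudo ",
--         "shutdown",
--         "reboot",
--         "halt",
--         "diskutil erase",
--         "diskutil partition",
--         "mkfs",
--         "dd ",
--         "launchctl bootout",
--         ":(){",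
--     ]
--     for token in blocked:
--         if any(lowered.startswith(token, i) for i in starts):
--             return False, f"Blocked command pattern: {token.strip()}"
--     return True, ""
-- ===== Notes on version B (the rewrite author's own statement) =====
-- stated objective: alternative
-- what changed: Instead of testing four separately-built substrings per blocked token, B precomputes once the list of candidate command-start suffixes (the whole command plus the text after every '; ', '&& ', '| ' occurrence) and then checks each token with a single any-startswith prefix pass over that list.
import Mathlib
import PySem

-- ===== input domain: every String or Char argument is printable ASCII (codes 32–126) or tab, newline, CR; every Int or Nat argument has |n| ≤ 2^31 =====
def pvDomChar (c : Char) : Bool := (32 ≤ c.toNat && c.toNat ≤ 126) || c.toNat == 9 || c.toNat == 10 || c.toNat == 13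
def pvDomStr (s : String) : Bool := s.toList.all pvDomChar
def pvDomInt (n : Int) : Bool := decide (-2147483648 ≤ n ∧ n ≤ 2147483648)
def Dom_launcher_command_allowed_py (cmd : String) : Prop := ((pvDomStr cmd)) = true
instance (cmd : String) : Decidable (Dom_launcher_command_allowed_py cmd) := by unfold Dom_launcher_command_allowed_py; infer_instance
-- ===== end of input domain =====

-- B replaces A's four per-token substring tests by one precomputed list of candidate
-- command-start positions followed by a single prefix test per token (alternative decomposition).

-- ===== PORT A =====
def pvBlockedA : List String :=
  ["rm ", "sudo ", "shutdown", "reboot", "halt", "diskutil erase",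
   "diskutil partition", "mkfs", "dd ", "launchctl bootout", ":(){"]

def pvScanA (lowered : String) : List String → Bool × String
  | [] => (true, "")
  | t :: ts =>
    if PySem.Str.startswith lowered t || PySem.Str.isIn ("; " ++ t) lowered
        || PySem.Str.isIn ("&& " ++ t) lowered || PySem.Str.isIn ("| " ++ t) lowered then
      (false, "Blocked command pattern: " ++ PySem.Str.strip t)
    else pvScanA lowered ts

def launcher_command_allowed_py (cmd : String) : Bool × String :=
  pvScanA (PySem.Str.lower (PySem.Str.strip cmd)) pvBlockedA

-- ===== PORT B =====
def pvBlockedB : List String :=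
  ["rm ", "sudo ", "shutdown", "reboot", "halt", "diskutil erase",
   "diskutil partition", "mkfs", "dd ", "launchctl bootout", ":(){"]

def pvSeps : List String := ["; ", "&& ", "| "]

-- Python's s.startswith(p, i) for 0 ≤ i: ported by hand as a prefix test on s.toList.drop i.toNat
-- (exact for the nonnegative start indices this program produces)
def pvStartswithAt (s : String) (p : String) (i : Int) : Bool :=
  PySem.Chars.startswith (s.toList.drop i.toNat) p.toList

-- the comprehension [j + len(sep) for j in range(len(lowered)) if lowered.startswith(sep, j)]
def pvStartsAfter (lowered sep : String) : List Int :=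
  (PySem.List.pyRange 0 (PySem.Str.len lowered)).filterMap (fun j =>
    if pvStartswithAt lowered sep j then some (j + PySem.Str.len sep) else none)

def pvStarts (lowered : String) : List Int :=
  0 :: pvSeps.flatMap (fun sep => pvStartsAfter lowered sep)

def pvScanB (lowered : String) (starts : List Int) : List String → Bool × String
  | [] => (true, "")
  | t :: ts =>
    if starts.any (fun i => pvStartswithAt lowered t i) then
      (false, "Blocked command pattern: " ++ PySem.Str.strip t)
    else pvScanB lowered starts ts

def launcher_command_allowed_py_alt (cmd : String) : Bool × String :=
  let lowered := PySem.Str.lower (PySem.Str.strip cmd)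
  pvScanB lowered (pvStarts lowered) pvBlockedB

-- ===== PRECONDITION & SPEC =====
def Spec_launcher_command_allowed_py (cmd : String) (out : Bool × String) : Prop := out = launcher_command_allowed_py_alt cmd
instance (cmd : String) (out : Bool × String) : Decidable (Spec_launcher_command_allowed_py cmd out) := by unfold Spec_launcher_command_allowed_py; infer_instance

-- ===== CLAIM (what is proved, stated in full; the proofs are below) =====
def Claim_equal_launcher_command_allowed_py : Prop := ∀ (cmd : String), Dom_launcher_command_allowed_py cmd → Spec_launcher_command_allowed_py cmd (launcher_command_allowed_py cmd)

-- ===== LEMMAS AND PROOFS =====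

lemma pv_append_prefix_iff (a b c : List Char) :
    (a ++ b) <+: c ↔ a <+: c ∧ b <+: c.drop a.length := by
  constructor
  · rintro ⟨t, rfl⟩
    refine ⟨⟨b ++ t, by simp⟩, ?_⟩
    rw [List.append_assoc, List.drop_left]
    exact ⟨t, rfl⟩
  · rintro ⟨ha, ⟨t, ht⟩⟩
    refine ⟨t, ?_⟩
    conv_rhs => rw [← List.take_append_drop a.length c, ← List.prefix_iff_eq_take.mp ha, ← ht]
    simp [List.append_assoc]

lemma pv_key (l sep tok : List Char) (hsep : sep ≠ []) :
    (∃ j : Int, (0 ≤ j ∧ j < (l.length : Int)) ∧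
      sep <+: l.drop j.toNat ∧ tok <+: l.drop (j.toNat + sep.length))
    ↔ PySem.Chars.isIn (sep ++ tok) l = true := by
  rw [← PySem.Chars.exists_prefix_drop_iff_isIn]
  constructor
  · rintro ⟨j, _, hs, ht⟩
    refine ⟨j.toNat, (pv_append_prefix_iff _ _ _).mpr ⟨hs, ?_⟩⟩
    rw [List.drop_drop]
    exact ht
  · rintro ⟨j, hj⟩
    rw [pv_append_prefix_iff] at hj
    obtain ⟨hs, ht⟩ := hj
    have hjl : j < l.length := by
      by_contra h'
      rw [List.drop_eq_nil_of_le (by omega)] at hs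
      exact hsep (List.prefix_nil.mp hs)
    refine ⟨(j : Int), ⟨by omega, by exact_mod_cast hjl⟩, by simp only [Int.toNat_natCast]; exact hs, ?_⟩
    rw [List.drop_drop] at ht
    simpa only [Int.toNat_natCast] using ht

lemma pv_startAny (lowered sep t : String) (h : sep.toList ≠ []) :
    ((pvStartsAfter lowered sep).any (fun i => pvStartswithAt lowered t i))
    = PySem.Str.isIn (sep ++ t) lowered := by
  rw [Bool.eq_iff_iff]
  rw [PySem.Str.isIn_eq, String.toList_append,
    ← pv_key lowered.toList sep.toList t.toList h]
  simp only [pvStartsAfter, pvStartswithAt, List.any_eq_true, List.mem_filterMap,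
    PySem.List.mem_pyRange_one, PySem.Str.len_eq, Option.ite_none_right_eq_some,
    Option.some.injEq, PySem.Chars.startswith_iff]
  constructor
  · rintro ⟨i, ⟨j, ⟨⟨h0, hl⟩, hs, rfl⟩⟩, ht⟩
    refine ⟨j, ⟨h0, hl⟩, hs, ?_⟩
    have : (j + (sep.toList.length : Int)).toNat = j.toNat + sep.toList.length := by omega
    rwa [this] at ht
  · rintro ⟨j, ⟨h0, hl⟩, hs, ht⟩
    refine ⟨j + (sep.toList.length : Int), ⟨j, ⟨⟨h0, hl⟩, hs, rfl⟩⟩, ?_⟩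
    have : (j + (sep.toList.length : Int)).toNat = j.toNat + sep.toList.length := by omega
    rwa [this]

lemma pv_cond_eq (lowered t : String) :
    ((pvStarts lowered).any (fun i => pvStartswithAt lowered t i))
    = (PySem.Str.startswith lowered t || PySem.Str.isIn ("; " ++ t) lowered
        || PySem.Str.isIn ("&& " ++ t) lowered || PySem.Str.isIn ("| " ++ t) lowered) := by
  have h1 := pv_startAny lowered "; " t (by decide)
  have h2 := pv_startAny lowered "&& " t (by decide)
  have h3 := pv_startAny lowered "| " t (by decide)
  have h0 : pvStartswithAt lowered t 0 = PySem.Str.startswith lowered t := by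
    simp [pvStartswithAt, PySem.Str.startswith_eq]
  simp only [pvStarts, pvSeps, List.flatMap_cons, List.flatMap_nil, List.append_nil,
    List.any_cons, List.any_append, h0, h1, h2, h3, Bool.or_assoc]

lemma pv_scan_eq (lowered : String) (ts : List String) :
    pvScanA lowered ts = pvScanB lowered (pvStarts lowered) ts := by
  induction ts with
  | nil => rfl
  | cons t ts ih => simp only [pvScanA, pvScanB, pv_cond_eq, ih]

-- ===== VERDICT (by name: the statement is the Claim_ definition above) =====
theorem launcher_command_allowed_py_spec : Claim_equal_launcher_command_allowed_py := by
  intro cmd _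
  unfold Spec_launcher_command_allowed_py launcher_command_allowed_py launcher_command_allowed_py_alt
  exact pv_scan_eq _ _
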